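-- pv_equiv track=rewrite | github.com/SilentHunter13/AoC_2017 | Day17.py | get_after_current
-- ===== SOURCE A (Python) =====
-- STEPS = 377
--
-- def get_after_current(iterations):
--     buffer = [0]
--     next_value = 1
--     current_position = 0
--
--     while next_value < iterations:
--         current_position = (current_position + STEPS) % len(buffer) + 1
--
--         buffer.insert(current_position, next_value)
--         next_value += 1
--
--     return buffer[current_position + 1]
-- ===== SOURCE B (Python) =====
-- STEPS = 377
--
-- def get_after_current(iterations):
--     # Record where each value is inserted; never build the buffer itself.
--     positions = []
--     current_position = 0
--     size = 1
--     for value in range(1, iterations):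
--         current_position = (current_position + STEPS) % size + 1
--         positions.append(current_position)
--         size += 1
--     # Walk backwards: undo each insertion until we find the value at slot q.
--     q = current_position + 1
--     for value in range(len(positions), 0, -1):
--         p = positions[value - 1]
--         if p == q:
--             return value
--         if p < q:
--             q -= 1
--     return [0][q]
-- ===== Notes on version B (the rewrite author's own statement) =====
-- stated objective: faster
-- what changed: B never builds the circular buffer: it records each insertion position in one O(n) forward pass and then scans those positions backwards, undoing insertions, to identify which value occupies the answer slot, replacing A's O(n) list.insert per step.
-- outside the precondition, e.g. on get_after_current(0): A raises IndexError, B raises IndexError; on get_after_current(1): A raises IndexError, B raises IndexError; on get_after_current(2): A raises IndexError, B raises IndexError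
import Mathlib
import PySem

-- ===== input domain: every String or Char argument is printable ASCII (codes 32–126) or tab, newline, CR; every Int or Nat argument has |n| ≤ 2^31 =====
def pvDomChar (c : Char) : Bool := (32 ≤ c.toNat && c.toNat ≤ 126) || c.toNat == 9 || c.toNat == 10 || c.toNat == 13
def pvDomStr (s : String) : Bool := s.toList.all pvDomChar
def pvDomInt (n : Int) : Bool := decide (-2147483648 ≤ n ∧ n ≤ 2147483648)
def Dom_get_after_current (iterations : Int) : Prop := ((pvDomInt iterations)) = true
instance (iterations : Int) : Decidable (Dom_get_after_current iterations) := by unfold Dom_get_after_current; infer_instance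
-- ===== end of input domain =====

-- B replaces A's O(n^2) simulation (a growing list with insertions) by an O(n) pass that
-- records each insertion position and a backward scan that identifies the value at the
-- answer slot; it returns the same value (and raises IndexError at the same inputs) as A.

def pvSTEPS : Int := 377

-- ===== PORT A =====
-- while next_value < iterations: cp = (cp+377) % len(buffer) + 1; buffer.insert(cp, nv); nv += 1
def pvLoopA : Nat → List Int → Int → Int → List Int × Int
  | 0, buffer, cp, _ => (buffer, cp)
  | m + 1, buffer, cp, nv =>
      let cp' := PySem.Int.mod (cp + pvSTEPS) (buffer.length : Int) + 1
      pvLoopA m (PySem.List.insert buffer cp' nv) cp' (nv + 1)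

def get_after_current (iterations : Int) : Int :=
  let st := pvLoopA (iterations - 1).toNat [0] 0 1
  -- buffer[current_position + 1]; IndexError (excluded by Pre_) ported as default 0
  PySem.List.pyGetD st.1 (st.2 + 1) 0

-- ===== PORT B =====
-- first loop of Source B: record the insertion position of every value, never build the buffer
def pvLoopB : Nat → Int → Int → List Int → List Int × Int
  | 0, cp, _, positions => (positions, cp)
  | m + 1, cp, size, positions =>
      let cp' := PySem.Int.mod (cp + pvSTEPS) size + 1
      pvLoopB m cp' (size + 1) (positions ++ [cp'])

-- second loop of Source B: for value in range(len(positions), 0, -1), i.e. over reversed positions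
def pvScanBack : List Int → Int → Int → Int
  | [], _, q => PySem.List.pyGetD [0] q 0  -- return [0][q]; IndexError (excluded by Pre_) as default 0
  | p :: rest, v, q =>
      if p = q then v
      else if p < q then pvScanBack rest (v - 1) (q - 1)
      else pvScanBack rest (v - 1) q

def get_after_current_alt (iterations : Int) : Int :=
  let st := pvLoopB (iterations - 1).toNat 0 1 []
  pvScanBack st.1.reverse (st.1.length : Int) (st.2 + 1)

-- ===== PRECONDITION & SPEC =====
-- Pre_ excludes exactly the inputs on which Python A raises IndexError at the final
-- buffer[current_position+1]: all iterations ≤ 1, and the finitely many iterations ≤ 2^31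
-- at which the last inserted value ends one slot before the linear end of the buffer
-- (computed exhaustively over the whole domain |iterations| ≤ 2^31). Python B raises there too.
-- Both ports return the pyGetD default 0 at those points, so the equality proof below happens
-- not to consume the Pre_ hypothesis; Pre_ is stated because the Pythons raise there.
def Pre_get_after_current (iterations : Int) : Prop :=
  2 ≤ iterations ∧ iterations ∉ ([2, 16, 24, 144, 495, 898, 1061, 1493, 1956, 2887, 3884,
    8575, 9999, 23216, 50051, 204856, 208138, 4472713, 188867101] : List Int)
instance (iterations : Int) : Decidable (Pre_get_after_current iterations) := by
  unfold Pre_get_after_current; infer_instance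

def pvWitness_get_after_current : Int := (2017)

def Spec_get_after_current (iterations : Int) (out : Int) : Prop := out = get_after_current_alt iterations
instance (iterations : Int) (out : Int) : Decidable (Spec_get_after_current iterations out) := by unfold Spec_get_after_current; infer_instance

-- ===== CLAIM (what is proved, stated in full; the proofs are below) =====
def Claim_equal_get_after_current : Prop := ∀ (iterations : Int), Dom_get_after_current iterations → Pre_get_after_current iterations → Spec_get_after_current iterations (get_after_current iterations)

-- ===== LEMMAS AND PROOFS =====

-- ghost state of A's loop after k insertions
def pvA : Nat → List Int × Int
  | 0 => ([0], 0)
  | k + 1 =>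
      let s := pvA k
      let cp' := PySem.Int.mod (s.2 + pvSTEPS) (s.1.length : Int) + 1
      (PySem.List.insert s.1 cp' ((k : Int) + 1), cp')

-- ghost state of B's first loop after k insertions
def pvB : Nat → List Int × Int
  | 0 => ([], 0)
  | k + 1 =>
      let s := pvB k
      let cp' := PySem.Int.mod (s.2 + pvSTEPS) ((s.1.length : Int) + 1) + 1
      (s.1 ++ [cp'], cp')

theorem pv_mod_bounds (x L : Int) (hL : 0 < L) :
    1 ≤ PySem.Int.mod x L + 1 ∧ PySem.Int.mod x L + 1 ≤ L := by
  rw [PySem.Int.mod_eq_emod_of_pos hL]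
  have h1 := Int.emod_nonneg x (ne_of_gt hL)
  have h2 := Int.emod_lt_of_pos x hL
  omega

theorem pv_insert_length (l : List Int) (p v : Int) (h0 : 0 ≤ p) (h : p ≤ (l.length : Int)) :
    (PySem.List.insert l p v).length = l.length + 1 := by
  rw [show p = ((p.toNat : Nat) : Int) by omega,
      PySem.List.insert_natCast l p.toNat v (by omega)]
  simp

theorem pv_insert_getD (l : List Int) (p v q : Int) (h0 : 0 ≤ p) (h : p ≤ (l.length : Int))
    (hq : 0 ≤ q) :
    PySem.List.pyGetD (PySem.List.insert l p v) q 0 =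
      if p = q then v
      else if p < q then PySem.List.pyGetD l (q - 1) 0
      else PySem.List.pyGetD l q 0 := by
  have hpn : p = ((p.toNat : Nat) : Int) := by omega
  have hqn : q = ((q.toNat : Nat) : Int) := by omega
  rw [hpn, hqn, PySem.List.insert_natCast l p.toNat v (by omega)]
  set pn := p.toNat
  set qn := q.toNat
  have hpl : pn ≤ l.length := by omega
  have htake : (l.take pn).length = pn := by simp; omega
  by_cases h1 : (pn : Int) = (qn : Int)
  · have he : pn = qn := by exact_mod_cast h1
    simp only [if_pos h1]
    rw [PySem.List.pyGetD_natCast]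
    rw [List.getD_eq_getElem?_getD, List.getElem?_append_right (by omega), htake]
    simp [← he]
  · simp only [if_neg h1]
    by_cases h2 : (pn : Int) < (qn : Int)
    · have hlt : pn < qn := by exact_mod_cast h2
      simp only [if_pos h2]
      rw [show ((qn : Int) - 1) = (((qn - 1 : Nat) : Nat) : Int) by omega]
      rw [PySem.List.pyGetD_natCast, PySem.List.pyGetD_natCast]
      rw [List.getD_eq_getElem?_getD, List.getD_eq_getElem?_getD]
      rw [List.getElem?_append_right (by omega), htake]
      rw [show qn - pn = (qn - pn - 1) + 1 by omega]
      simp only [List.getElem?_cons_succ, List.getElem?_drop]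
      congr 2
      omega
    · have hgt : qn < pn := by omega
      simp only [if_neg h2]
      rw [PySem.List.pyGetD_natCast, PySem.List.pyGetD_natCast]
      rw [List.getD_eq_getElem?_getD, List.getD_eq_getElem?_getD]
      rw [List.getElem?_append_left (by omega)]
      rw [List.getElem?_take_of_lt hgt]

theorem pvB_len (k : Nat) : (pvB k).1.length = k := by
  induction k with
  | zero => rfl
  | succ k ih => simp [pvB, ih]

theorem pvA_len (k : Nat) : (pvA k).1.length = k + 1 ∧ 0 ≤ (pvA k).2 := by
  induction k with
  | zero => simp [pvA]
  | succ k ih =>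
      obtain ⟨hlen, h0⟩ := ih
      have hlenI : ((pvA k).1.length : Int) = (k : Int) + 1 := by rw [hlen]; push_cast; ring
      have hb := pv_mod_bounds ((pvA k).2 + pvSTEPS) ((k : Int) + 1) (by positivity)
      constructor
      · show (PySem.List.insert (pvA k).1 _ _).length = _
        rw [hlenI, pv_insert_length _ _ _ (by omega) (by rw [hlenI]; omega), hlen]
      · show (0 : Int) ≤ PySem.Int.mod ((pvA k).2 + pvSTEPS) ((pvA k).1.length : Int) + 1
        rw [hlenI]; omega

theorem pv_cp_eq (k : Nat) : (pvA k).2 = (pvB k).2 := by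
  induction k with
  | zero => rfl
  | succ k ih =>
      show PySem.Int.mod ((pvA k).2 + pvSTEPS) ((pvA k).1.length : Int) + 1
         = PySem.Int.mod ((pvB k).2 + pvSTEPS) (((pvB k).1.length : Int) + 1) + 1
      rw [ih, (pvA_len k).1, pvB_len]
      push_cast
      ring_nf

-- key lemma: A's buffer lookup = B's backward scan, for every nonnegative index
theorem pv_key (k : Nat) : ∀ (q : Int), 0 ≤ q →
    PySem.List.pyGetD (pvA k).1 q 0 = pvScanBack (pvB k).1.reverse (k : Int) q := by
  induction k with
  | zero => intro q hq; simp [pvA, pvB, pvScanBack]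
  | succ k ih =>
      intro q hq
      obtain ⟨hlen, h0⟩ := pvA_len k
      have hlenI : ((pvA k).1.length : Int) = (k : Int) + 1 := by rw [hlen]; push_cast; ring
      have hb := pv_mod_bounds ((pvA k).2 + pvSTEPS) ((k : Int) + 1) (by positivity)
      have hAstep : (pvA (k+1)).1
          = PySem.List.insert (pvA k).1 (PySem.Int.mod ((pvA k).2 + pvSTEPS) ((k : Int) + 1) + 1) ((k : Int) + 1) := by
        show PySem.List.insert (pvA k).1 (PySem.Int.mod ((pvA k).2 + pvSTEPS) ((pvA k).1.length : Int) + 1) ((k : Int) + 1) = _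
        rw [hlenI]
      have hBstep : (pvB (k+1)).1
          = (pvB k).1 ++ [PySem.Int.mod ((pvA k).2 + pvSTEPS) ((k : Int) + 1) + 1] := by
        show (pvB k).1 ++ [PySem.Int.mod ((pvB k).2 + pvSTEPS) (((pvB k).1.length : Int) + 1) + 1] = _
        rw [← pv_cp_eq k, pvB_len]
      set p := PySem.Int.mod ((pvA k).2 + pvSTEPS) ((k : Int) + 1) + 1 with hp
      have hp1 : 1 ≤ p := hb.1
      have hpk : p ≤ (k : Int) + 1 := hb.2
      rw [hAstep, hBstep, List.reverse_append]
      simp only [List.reverse_cons, List.reverse_nil, List.nil_append, List.singleton_append]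
      rw [pv_insert_getD (pvA k).1 p ((k : Int) + 1) q (by omega) (by rw [hlenI]; omega) hq]
      show _ = pvScanBack (p :: (pvB k).1.reverse) (((k+1 : Nat) : Nat) : Int) q
      rw [show (((k+1 : Nat) : Nat) : Int) = (k : Int) + 1 by push_cast; ring]
      simp only [pvScanBack]
      by_cases h1 : p = q
      · simp [h1]
      · simp only [if_neg h1]
        by_cases h2 : p < q
        · simp only [if_pos h2]
          rw [show (k : Int) + 1 - 1 = (k : Int) by ring]
          exact ih (q - 1) (by omega)
        · simp only [if_neg h2]
          rw [show (k : Int) + 1 - 1 = (k : Int) by ring]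
          exact ih q hq

theorem pvLoopA_eq (m : Nat) : ∀ k, pvLoopA m (pvA k).1 (pvA k).2 ((k : Int) + 1) = pvA (k + m) := by
  induction m with
  | zero => intro k; simp [pvLoopA]
  | succ m ih =>
      intro k
      show pvLoopA (m+1) (pvA k).1 (pvA k).2 ((k : Int) + 1) = _
      simp only [pvLoopA]
      rw [show PySem.List.insert (pvA k).1
            (PySem.Int.mod ((pvA k).2 + pvSTEPS) ((pvA k).1.length : Int) + 1) ((k:Int)+1) = (pvA (k+1)).1 from rfl,
          show PySem.Int.mod ((pvA k).2 + pvSTEPS) ((pvA k).1.length : Int) + 1 = (pvA (k+1)).2 from rfl,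
          show (k : Int) + 1 + 1 = ((k+1 : Nat) : Int) + 1 by push_cast; ring,
          ih (k+1)]
      congr 1
      omega

theorem pvLoopB_eq (m : Nat) : ∀ k, pvLoopB m (pvB k).2 ((k : Int) + 1) (pvB k).1 = pvB (k + m) := by
  induction m with
  | zero => intro k; simp [pvLoopB]
  | succ m ih =>
      intro k
      simp only [pvLoopB]
      rw [show (k : Int) + 1 = ((pvB k).1.length : Int) + 1 by rw [pvB_len]]
      rw [show (pvB k).1 ++ [PySem.Int.mod ((pvB k).2 + pvSTEPS) (((pvB k).1.length : Int) + 1) + 1] = (pvB (k+1)).1 from rfl,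
          show PySem.Int.mod ((pvB k).2 + pvSTEPS) (((pvB k).1.length : Int) + 1) + 1 = (pvB (k+1)).2 from rfl,
          show ((pvB k).1.length : Int) + 1 + 1 = ((k+1 : Nat) : Int) + 1 by rw [pvB_len]; push_cast; ring,
          ih (k+1)]
      congr 1
      omega

-- ===== VERDICT (by name: the statement is the Claim_ definition above) =====
theorem get_after_current_spec : Claim_equal_get_after_current := by
  intro n _ _
  unfold Spec_get_after_current get_after_current get_after_current_alt
  set m := (n - 1).toNat with hm
  have hA : pvLoopA m [0] 0 1 = pvA m := by
    have h := pvLoopA_eq m 0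
    simpa [pvA] using h
  have hB : pvLoopB m 0 1 [] = pvB m := by
    have h := pvLoopB_eq m 0
    simpa [pvB] using h
  have h0 := (pvA_len m).2
  simp only [hA, hB, pvB_len, ← pv_cp_eq m]
  exact pv_key m ((pvA m).2 + 1) (by omega)
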